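-- pv_equiv track=rewrite | github.com/johnvtan/stuff | aoc/2025/day06/main.py | parse
-- ===== SOURCE A (Python) =====
-- def parse(s: str):
--     by_line = s.split("\n")
--     ops = []
--     curr = ""
--     for c in by_line[-1]:
--         if curr == "":
--             curr = c
--         else:
--             if c != " ":
--                 ops.append(curr[:-1])
--                 curr = c
--             else:
--                 curr += c
--     ops.append(curr)
--
--     problems = [[op] for op in ops]
--     for line in by_line[:-1]:
--         i = 0
--         for problem, op in zip(problems, ops):
--             expected_size = len(op)
--             acc = line[i : i + expected_size + 1]
--             problem.append(acc)
--             i += expected_size + 1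
--
--     return problems
-- ===== SOURCE B (Python) =====
-- def parse(s: str):
--     lines = s.split("\n")
--     last = lines[-1]
--     rest = lines[:-1]
--     n = len(last)
--     starts = [0] + [i for i in range(1, n) if last[i] != " "]
--     bounds = starts + [n + 1]
--     return [[last[p:q - 1]] + [line[p:q] for line in rest]
--             for p, q in zip(bounds, bounds[1:])]
-- ===== Notes on version B (the rewrite author's own statement) =====
-- stated objective: simpler
-- what changed: Replaces A's char-by-char accumulator state machine over the last line plus a per-line running-offset zip loop by computing the column-start index table of the last line once and slicing every line (and the op itself) at those fixed boundaries, building each problem column in one comprehension.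
import Mathlib
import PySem

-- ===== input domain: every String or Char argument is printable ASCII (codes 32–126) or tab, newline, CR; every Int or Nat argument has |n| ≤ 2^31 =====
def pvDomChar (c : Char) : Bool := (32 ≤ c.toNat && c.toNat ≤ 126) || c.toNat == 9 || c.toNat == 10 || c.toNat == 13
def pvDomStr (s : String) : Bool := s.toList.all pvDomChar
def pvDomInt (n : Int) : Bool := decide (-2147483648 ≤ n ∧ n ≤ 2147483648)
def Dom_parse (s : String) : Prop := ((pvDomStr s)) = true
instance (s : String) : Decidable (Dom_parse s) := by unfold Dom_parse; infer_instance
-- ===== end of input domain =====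

-- B replaces A's char-by-char accumulator state machine and running-offset line loop by a
-- column-boundary index table computed once from the last line, slicing every line at those
-- fixed bounds (objective: simpler, same cost).

-- ===== PORT A =====
-- inner loop 'for problem, op in zip(problems, ops)' with running offset i
def parseLineLoop (line : String) : Int → List (List String × String) → List (List String)
  | _, [] => []
  | i, (prob, op) :: rest =>
      let sz : Int := PySem.Str.len op
      (prob ++ [PySem.Str.slice line (some i) (some (i + sz + 1))])
        :: parseLineLoop line (i + sz + 1) rest

def parse (s : String) : List (List String) :=
  let byLine : List String := (PySem.Str.split? s "\n").getD []   -- sep "\n" ≠ "": split? is never none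
  let lastLine : String := PySem.List.pyGetD byLine (-1) ""       -- byLine ≠ []: by_line[-1] never raises
  -- curr is a Python str built char by char; modeled as List Char, curr[:-1] = dropLast
  let st := lastLine.toList.foldl
      (fun (st : List String × List Char) c =>
        if st.2 = [] then (st.1, [c])
        else if c ≠ ' ' then (st.1 ++ [String.ofList st.2.dropLast], [c])
        else (st.1, st.2 ++ [c]))
      ([], [])
  let ops : List String := st.1 ++ [String.ofList st.2]
  let problems : List (List String) := ops.map (fun op => [op])
  (PySem.List.slice byLine none (some (-1))).foldl
    (fun problems line => parseLineLoop line 0 (problems.zip ops)) problems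

-- ===== PORT B =====
def parse_alt (s : String) : List (List String) :=
  let lines : List String := (PySem.Str.split? s "\n").getD []    -- sep "\n" ≠ "": split? is never none
  let lastLine : String := PySem.List.pyGetD lines (-1) ""        -- lines ≠ []: lines[-1] never raises
  let rest : List String := PySem.List.slice lines none (some (-1))
  let n : Int := PySem.Str.len lastLine
  -- 'last[i] != " "': i is always in range, so Python's 1-char-string comparison is pyGet? ≠ some ' '
  let starts : List Int :=
    0 :: (PySem.List.pyRange 1 n 1).filter (fun i => PySem.Str.pyGet? lastLine i ≠ some ' ')
  let bounds : List Int := starts ++ [n + 1]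
  (bounds.zip (PySem.List.slice bounds (some 1) none)).map (fun pq =>
    [PySem.Str.slice lastLine (some pq.1) (some (pq.2 - 1))]
      ++ rest.map (fun line => PySem.Str.slice line (some pq.1) (some pq.2)))

-- ===== PRECONDITION & SPEC =====
def Spec_parse (s : String) (out : List (List String)) : Prop := out = parse_alt s
instance (s : String) (out : List (List String)) : Decidable (Spec_parse s out) := by unfold Spec_parse; infer_instance

-- ===== CLAIM (what is proved, stated in full; the proofs are below) =====
def Claim_equal_parse : Prop := ∀ (s : String), Dom_parse s → Spec_parse s (parse s)

-- ===== LEMMAS AND PROOFS =====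

-- A's state machine over the last line, with the accumulator peeled off
def pvGo : List Char → List Char → List (List Char)
  | curr, [] => [curr]
  | curr, c :: cs => if c ≠ ' ' then curr.dropLast :: pvGo [c] cs else pvGo (curr ++ [c]) cs

-- column starts of cs from position j on
def pvNsp (cs : List Char) (j : Nat) : List Nat :=
  (List.range' j (cs.length - j)).filter (fun i => cs.getD i ' ' ≠ ' ')

-- the tokens cut out of cs by a bounds list
def pvToks (cs : List Char) : List Nat → List (List Char)
  | p :: q :: rest => (cs.drop p).take (q - 1 - p) :: pvToks cs (q :: rest)
  | _ => []

-- the full output determined by a bounds list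
def pvCols (cs : List Char) (pre : List String) : List Nat → List (List String)
  | p :: q :: rest =>
      (String.ofList ((cs.drop p).take (q - 1 - p))
         :: pre.map (fun line => PySem.Str.slice line (some (p : Int)) (some (q : Int))))
        :: pvCols cs pre (q :: rest)
  | _ => []

-- consecutive bounds are increasing and stay ≤ m+1
def pvWF (m : Nat) : List Nat → Prop
  | p :: q :: rest => p < q ∧ q ≤ m + 1 ∧ pvWF m (q :: rest)
  | _ => True

lemma pv_splitOn_go_ne_nil (sep : List Char) :
    ∀ (fuel : Nat) (l cur : List Char) (acc : List (List Char)),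
      PySem.Chars.splitOn.go sep fuel l cur acc ≠ [] := by
  intro fuel
  induction fuel with
  | zero => intro l cur acc; simp [PySem.Chars.splitOn.go]
  | succ n ih =>
    intro l cur acc
    cases l with
    | nil => simp [PySem.Chars.splitOn.go]
    | cons c rest =>
      rw [PySem.Chars.splitOn.go]
      split
      · exact ih _ _ _
      · exact ih _ _ _

lemma pv_lines_ex (s : String) :
    ∃ pre lst, (PySem.Str.split? s "\n").getD [] = pre ++ [lst] := by
  have h : (PySem.Str.split? s "\n").getD [] ≠ [] := by
    rw [PySem.Str.split?.eq_1]
    simp [PySem.Chars.split?, PySem.Chars.splitOn]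
    intro h
    exact absurd (congrArg (List.map String.ofList) h)
      (by simpa using pv_splitOn_go_ne_nil _ _ _ _ _)
  rcases List.eq_nil_or_concat ((PySem.Str.split? s "\n").getD []) with h0 | ⟨pre, lst, h0⟩
  · exact absurd h0 h
  · exact ⟨pre, lst, by simpa using h0⟩

lemma pv_accGo (cs : List Char) : ∀ (ops : List String) (curr : List Char), curr ≠ [] →
    (cs.foldl
      (fun (st : List String × List Char) c =>
        if st.2 = [] then (st.1, [c])
        else if c ≠ ' ' then (st.1 ++ [String.ofList st.2.dropLast], [c])
        else (st.1, st.2 ++ [c]))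
      (ops, curr)).1 ++ [String.ofList (cs.foldl
      (fun (st : List String × List Char) c =>
        if st.2 = [] then (st.1, [c])
        else if c ≠ ' ' then (st.1 ++ [String.ofList st.2.dropLast], [c])
        else (st.1, st.2 ++ [c]))
      (ops, curr)).2] = ops ++ (pvGo curr cs).map String.ofList := by
  induction cs with
  | nil => intro ops curr h; simp [pvGo]
  | cons c rest ih =>
    intro ops curr h
    simp only [List.foldl_cons, if_neg h]
    by_cases hc : c = ' '
    · subst hc
      rw [if_neg (by simp), pvGo, if_neg (by simp)]
      exact ih ops (curr ++ [' ']) (by simp)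
    · rw [if_pos hc, pvGo, if_pos hc,
        ih (ops ++ [String.ofList curr.dropLast]) [c] (by simp)]
      simp

lemma pvNsp_cons (cs : List Char) (j : Nat) (h : j < cs.length) :
    pvNsp cs j = if cs.getD j ' ' ≠ ' ' then j :: pvNsp cs (j+1) else pvNsp cs (j+1) := by
  unfold pvNsp
  have : cs.length - j = (cs.length - (j+1)) + 1 := by omega
  rw [this, List.range'_succ, List.filter_cons]
  split <;> simp_all

lemma pvNsp_nil (cs : List Char) (j : Nat) (h : cs.length ≤ j) : pvNsp cs j = [] := by
  unfold pvNsp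
  have : cs.length - j = 0 := by omega
  simp [this]

lemma pv_dropLast_take (l : List Char) (n : Nat) (h : n ≤ l.length) :
    (l.take n).dropLast = l.take (n-1) := by
  rw [List.dropLast_eq_take]
  simp [List.take_take]
  omega

lemma pv_goEq (cs : List Char) : ∀ (k j p : Nat), j ≤ cs.length → p < j → cs.length - j = k →
    pvGo ((cs.drop p).take (j - p)) (cs.drop j)
      = pvToks cs ((p :: pvNsp cs j) ++ [cs.length + 1]) := by
  intro k
  induction k with
  | zero =>
    intro j p hj hp hk
    have hj' : j = cs.length := by omega
    subst hj'
    rw [pvNsp_nil cs _ le_rfl]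
    simp only [List.drop_length, pvGo, List.cons_append, List.nil_append, pvToks]
    have : cs.length + 1 - 1 - p = cs.length - p := by omega
    rw [this]
  | succ k ih =>
    intro j p hj hp hk
    have hjlt : j < cs.length := by omega
    have hdrop : cs.drop j = cs[j] :: cs.drop (j+1) := List.drop_eq_getElem_cons hjlt
    rw [hdrop, pvGo, pvNsp_cons cs j hjlt]
    by_cases hc : cs[j] = ' '
    · rw [if_neg (by simp [hc]), if_neg (by simp [List.getD, List.getElem?_eq_getElem hjlt, hc])]
      have hext : ((cs.drop p).take (j - p)) ++ [cs[j]] = (cs.drop p).take (j + 1 - p) := by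
        have h1 : j + 1 - p = (j - p) + 1 := by omega
        rw [h1, List.take_add_one]
        congr 1
        have : (cs.drop p)[j - p]? = some cs[j] := by
          rw [List.getElem?_drop]
          have : p + (j - p) = j := by omega
          rw [this, List.getElem?_eq_getElem hjlt]
        simp [this]
      rw [hext]
      exact ih (j+1) p (by omega) (by omega) (by omega)
    · rw [if_pos (by simp [hc]), if_pos (by simp [List.getD, List.getElem?_eq_getElem hjlt, hc])]
      simp only [List.cons_append, pvToks]
      congr 1
      · rw [pv_dropLast_take]
        · congr 1; omega
        · simp; omega
      · have h1 : [cs[j]] = (cs.drop j).take (j + 1 - j) := by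
          have : j + 1 - j = 1 := by omega
          rw [this, List.take_one, hdrop]
          simp [List.getElem?_eq_getElem hjlt]
        rw [h1]
        exact ih (j+1) j (by omega) (by omega) (by omega)

lemma pv_wf (cs : List Char) : ∀ (k j p : Nat), j ≤ cs.length → p < j → cs.length - j = k →
    pvWF cs.length ((p :: pvNsp cs j) ++ [cs.length + 1]) := by
  intro k
  induction k with
  | zero =>
    intro j p hj hp hk
    rw [pvNsp_nil cs j (by omega)]
    exact ⟨by omega, le_rfl, trivial⟩
  | succ k ih =>
    intro j p hj hp hk
    have hjlt : j < cs.length := by omega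
    rw [pvNsp_cons cs j hjlt]
    split
    · exact ⟨by omega, by omega, ih (j+1) j (by omega) (by omega) (by omega)⟩
    · exact ih (j+1) p (by omega) (by omega) (by omega)

lemma pvTokLen (cs : List Char) (p q : Nat) (hq : q ≤ cs.length + 1) :
    ((cs.drop p).take (q - 1 - p)).length = q - 1 - p := by
  simp; omega

lemma pvLine (cs : List Char) (line : String) :
    ∀ (bl : List Nat) (p : Nat), pvWF cs.length (p :: bl) → ∀ (hist : List String),
      parseLineLoop line (p : Int)
          ((pvCols cs hist (p :: bl)).zip ((pvToks cs (p :: bl)).map String.ofList))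
        = pvCols cs (hist ++ [line]) (p :: bl) := by
  intro bl
  induction bl with
  | nil => intro p _ hist; simp [pvCols, pvToks, parseLineLoop]
  | cons q rest ih =>
    intro p hwf hist
    obtain ⟨hpq, hq, hwf'⟩ := hwf
    simp only [pvCols, pvToks, List.map_cons, List.zip_cons_cons, parseLineLoop]
    have hsz : PySem.Str.len (String.ofList ((cs.drop p).take (q - 1 - p))) = ((q - 1 - p : Nat) : Int) := by
      simp [PySem.Str.len_eq, pvTokLen cs p q hq]
    rw [hsz]
    have harith : ((p : Int) + ((q - 1 - p : Nat) : Int) + 1) = ((q : Nat) : Int) := by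
      omega
    rw [harith]
    refine congrArg₂ _ ?_ (ih q hwf' hist)
    simp [List.map_append]


lemma pvColsNil (cs : List Char) : ∀ bl : List Nat,
    (pvToks cs bl).map (fun t => [String.ofList t]) = pvCols cs [] bl := by
  intro bl
  induction bl with
  | nil => simp [pvToks, pvCols]
  | cons p tl ih =>
    cases tl with
    | nil => simp [pvToks, pvCols]
    | cons q rest =>
      simp only [pvToks, pvCols, List.map_cons, List.map_nil]
      exact congrArg _ ih

lemma pvFoldl (cs : List Char) (bl : List Nat) (hwf : pvWF cs.length (0 :: bl)) :
    ∀ (pre hist : List String),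
      pre.foldl
        (fun probs line => parseLineLoop line 0
          (probs.zip ((pvToks cs (0 :: bl)).map String.ofList)))
        (pvCols cs hist (0 :: bl))
      = pvCols cs (hist ++ pre) (0 :: bl) := by
  intro pre
  induction pre with
  | nil => intro hist; simp
  | cons line rest ih =>
    intro hist
    simp only [List.foldl_cons]
    have hl := pvLine cs line bl 0 hwf hist
    rw [Nat.cast_zero] at hl
    rw [hl, ih (hist ++ [line])]
    simp


lemma pv_tok_str (cs : List Char) (lastLine : String) (hcs : lastLine.toList = cs)
    (p q : Nat) (h1 : 1 ≤ q) :
    PySem.Str.slice lastLine (some (p : Int)) (some ((q : Int) - 1))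
      = String.ofList ((cs.drop p).take (q - 1 - p)) := by

  have h2 : ((q : Int) - 1) = ((q - 1 : Nat) : Int) := by omega
  rw [h2, ← String.ofList_toList
    (s := PySem.Str.slice lastLine (some (p : Int)) (some ((q - 1 : Nat) : Int)))]
  congr 1
  simp [PySem.List.slice_natCast, hcs]

lemma pv_bside (cs : List Char) (lastLine : String) (hcs : lastLine.toList = cs)
    (pre : List String) : ∀ (bl : List Nat), pvWF cs.length bl →
    ((bl.map (Nat.cast : Nat → Int)).zip ((bl.map (Nat.cast : Nat → Int)).drop 1)).map
      (fun pq =>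
        [PySem.Str.slice lastLine (some pq.1) (some (pq.2 - 1))]
          ++ pre.map (fun line => PySem.Str.slice line (some pq.1) (some pq.2)))
    = pvCols cs pre bl := by
  intro bl
  induction bl with
  | nil => simp [pvCols]
  | cons p tl ih =>
    cases tl with
    | nil => simp [pvCols]
    | cons q rest =>
      intro hwf
      obtain ⟨hpq, hq, hwf'⟩ := hwf
      simp only [List.map_cons, List.drop_succ_cons, List.drop_zero, List.zip_cons_cons,
        List.map_cons] at ih ⊢
      rw [pvCols]
      refine congrArg₂ _ ?_ (ih hwf')
      rw [pv_tok_str cs lastLine hcs p q (by omega)]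
      simp


lemma pv_starts (cs : List Char) (lastLine : String) (hcs : lastLine.toList = cs) :
    (PySem.List.pyRange 1 (cs.length : Int) 1).filter
        (fun i => PySem.Str.pyGet? lastLine i ≠ some ' ')
      = (pvNsp cs 1).map (Nat.cast : Nat → Int) := by
  unfold pvNsp

  have hrange : ((cs.length : Int) - 1).toNat = cs.length - 1 := by omega
  rw [PySem.List.pyRange_one, List.filter_map, List.range'_eq_map_range, List.filter_map, hrange,
    List.map_map]
  have hfc : ∀ k ∈ List.range (cs.length - 1),
      ((fun i => decide (PySem.Str.pyGet? lastLine i ≠ some ' ')) ∘ fun (k : Nat) => (1 : Int) + (k : Int)) k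
        = ((fun i => decide (cs.getD i ' ' ≠ ' ')) ∘ fun x => 1 + x) k := by
    intro k hk
    rw [List.mem_range] at hk
    have h1k : 1 + k < cs.length := by omega
    have hg : PySem.List.pyGet? lastLine.toList ((1 : Int) + (k : Int)) = cs[1 + k]? := by
      have he : ((1 : Int) + (k : Int)) = (((1 + k : Nat)) : Int) := by push_cast; ring
      rw [he, PySem.List.pyGet?_natCast, hcs]
    simp only [Function.comp]
    simp [hg, List.getElem?_eq_getElem h1k, List.getD]
  rw [List.filter_congr hfc]
  simp


lemma pv_wftop (cs : List Char) :
    pvWF cs.length ((0 :: pvNsp cs 1) ++ [cs.length + 1]) := by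
  cases cs with
  | nil =>
    rw [pvNsp_nil [] 1 (by simp)]
    exact ⟨by omega, by omega, trivial⟩
  | cons c cs' =>
    exact pv_wf (c :: cs') cs'.length 1 0 (by simp) Nat.zero_lt_one (by simp)

lemma pv_ops (cs : List Char) :
    (cs.foldl
      (fun (st : List String × List Char) c =>
        if st.2 = [] then (st.1, [c])
        else if c ≠ ' ' then (st.1 ++ [String.ofList st.2.dropLast], [c])
        else (st.1, st.2 ++ [c])) ([], [])).1
      ++ [String.ofList (cs.foldl
      (fun (st : List String × List Char) c =>
        if st.2 = [] then (st.1, [c])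
        else if c ≠ ' ' then (st.1 ++ [String.ofList st.2.dropLast], [c])
        else (st.1, st.2 ++ [c])) ([], [])).2]
    = (pvToks cs ((0 :: pvNsp cs 1) ++ [cs.length + 1])).map String.ofList := by
  cases cs with
  | nil =>
    rw [pvNsp_nil [] 1 (by simp)]
    simp [pvToks]
  | cons c cs' =>
    rw [List.foldl_cons, if_pos rfl, pv_accGo cs' _ [c] (by simp)]
    have hgo := pv_goEq (c :: cs') cs'.length 1 0 (by simp) Nat.zero_lt_one (by simp)
    simp only [List.drop_succ_cons, List.drop_zero, Nat.sub_zero, List.take_succ_cons,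
      List.take_zero] at hgo
    rw [hgo]
    rfl

lemma pv_A (cs : List Char) (pre : List String) :
    pre.foldl
      (fun problems line => parseLineLoop line 0
        (problems.zip ((pvToks cs ((0 :: pvNsp cs 1) ++ [cs.length + 1])).map String.ofList)))
      (List.map (fun op => [op])
        ((pvToks cs ((0 :: pvNsp cs 1) ++ [cs.length + 1])).map String.ofList))
    = pvCols cs pre ((0 :: pvNsp cs 1) ++ [cs.length + 1]) := by
  have hinit : List.map (fun op => [op])
        ((pvToks cs ((0 :: pvNsp cs 1) ++ [cs.length + 1])).map String.ofList)
      = pvCols cs [] ((0 :: pvNsp cs 1) ++ [cs.length + 1]) := by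
    rw [← pvColsNil cs]
    simp [List.map_map, Function.comp]
  rw [hinit]
  have hbl : (0 :: pvNsp cs 1) ++ [cs.length + 1] = 0 :: (pvNsp cs 1 ++ [cs.length + 1]) := by
    simp
  rw [hbl]
  have := pvFoldl cs (pvNsp cs 1 ++ [cs.length + 1]) (by rw [← hbl]; exact pv_wftop cs) pre []
  simpa using this

lemma pv_B (cs : List Char) (lst : String) (hcs : lst.toList = cs) (pre : List String) :
    List.map
      (fun pq =>
        [PySem.Str.slice lst (some pq.1) (some (pq.2 - 1))] ++
          List.map (fun line => PySem.Str.slice line (some pq.1) (some pq.2)) pre)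
      (((0 :: (PySem.List.pyRange 1 (PySem.Str.len lst) 1).filter
              (fun i => PySem.Str.pyGet? lst i ≠ some ' ')) ++ [PySem.Str.len lst + 1]).zip
        (PySem.List.slice
          ((0 :: (PySem.List.pyRange 1 (PySem.Str.len lst) 1).filter
              (fun i => PySem.Str.pyGet? lst i ≠ some ' ')) ++ [PySem.Str.len lst + 1])
          (some 1)))
    = pvCols cs pre ((0 :: pvNsp cs 1) ++ [cs.length + 1]) := by
  have hlen : PySem.Str.len lst = ((cs.length : Nat) : Int) := by
    simp [PySem.Str.len_eq, hcs]
  rw [hlen, pv_starts cs lst hcs]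
  have hb : (0 :: (pvNsp cs 1).map (Nat.cast : Nat → Int)) ++ [((cs.length : Nat) : Int) + 1]
      = ((0 :: pvNsp cs 1) ++ [cs.length + 1]).map (Nat.cast : Nat → Int) := by
    simp
  rw [hb]
  rw [PySem.List.slice_from _ (show (0 : Int) ≤ 1 by norm_num),
    show ((1 : Int)).toNat = 1 from rfl]
  exact pv_bside cs lst hcs pre _ (pv_wftop cs)

-- ===== VERDICT (by name: the statement is the Claim_ definition above) =====
theorem parse_spec : Claim_equal_parse := by
  unfold Claim_equal_parse
  intro s _
  unfold Spec_parse parse parse_alt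
  obtain ⟨pre, lst, hL⟩ := pv_lines_ex s
  rw [hL]
  simp only [PySem.List.pyGetD_neg_one_append_singleton, PySem.List.slice_to_neg_one,
    List.dropLast_concat]
  rw [pv_ops lst.toList, pv_A lst.toList pre, pv_B lst.toList lst rfl pre]
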